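-- pv_equiv track=rewrite | github.com/FionaGachuuri/alx-interview | 0x0A-primegame/0-prime_game.py | precompute_winners
-- ===== SOURCE A (Python) =====
-- def precompute_winners(max_n):
--     """
--     Precompute game winners for all n from 1 to max_n using dynamic programming.
--
--     The key insight: The game outcome depends only on the count of prime moves available.
--     Since Maria goes first, she wins if there's an odd number of prime moves.
--
--     Args:
--         max_n (int): Maximum value to precompute
--
--     Returns:
--         list: winners[i] = winner for game with n = i
--     """
--     if max_n < 1:
--         return ["Ben"]
--
--     # Generate all primes up to max_n using Sieve of Eratosthenes
--     primes = sieve_of_eratosthenes(max_n)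
--
--     # Convert to set for O(1) lookup
--     prime_set = set(primes)
--
--     # winners[i] stores the winner for n = i
--     winners = ["Ben"] * (max_n + 1)
--
--     # For each possible n, determine the winner
--     for n in range(1, max_n + 1):
--         # Count how many primes are <= n
--         prime_count = sum(1 for p in primes if p <= n)
--
--         # Maria wins if odd number of primes (she goes first)
--         # Ben wins if even number of primes
--         if prime_count % 2 == 1:
--             winners[n] = "Maria"
--         else:
--             winners[n] = "Ben"
--
--     return winners
--
-- def sieve_of_eratosthenes(limit):
--     """
--     Generate all prime numbers up to limit using Sieve of Eratosthenes.
--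
--     Args:
--         limit (int): Upper limit (inclusive)
--
--     Returns:
--         list: List of prime numbers up to limit
--     """
--     if limit < 2:
--         return []
--
--     # Initialize boolean array - True means potentially prime
--     is_prime = [True] * (limit + 1)
--     is_prime[0] = is_prime[1] = False
--
--     # Sieve algorithm
--     for i in range(2, int(limit ** 0.5) + 1):
--         if is_prime[i]:
--             # Mark all multiples of i as composite
--             for j in range(i * i, limit + 1, i):
--                 is_prime[j] = False
--
--     # Collect all prime numbers
--     return [i for i in range(2, limit + 1) if is_prime[i]]
-- ===== SOURCE B (Python) =====
-- def precompute_winners(max_n):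
--     """One sieve pass plus a running prime count: O(n log log n) instead of A's
--     per-n rescan of the prime list."""
--     if max_n < 1:
--         return ["Ben"]
--     is_prime = [True] * (max_n + 1)
--     is_prime[0] = is_prime[1] = False
--     i = 2
--     while i * i <= max_n:
--         if is_prime[i]:
--             for j in range(i * i, max_n + 1, i):
--                 is_prime[j] = False
--         i += 1
--     winners = ["Ben"]
--     count = 0
--     for n in range(1, max_n + 1):
--         if is_prime[n]:
--             count += 1
--         winners.append("Maria" if count % 2 == 1 else "Ben")
--     return winners
-- ===== Notes on version B (the rewrite author's own statement) =====
-- stated objective: faster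
-- what changed: B replaces A's per-n rescan of the whole prime list (sum(1 for p in primes if p <= n) inside the loop) with a single forward pass that maintains a running count of primes seen so far over the sieve's boolean array, appending each winner as it goes; B's sieve loop also tests i*i <= max_n directly instead of a float sqrt bound.
import Mathlib
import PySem

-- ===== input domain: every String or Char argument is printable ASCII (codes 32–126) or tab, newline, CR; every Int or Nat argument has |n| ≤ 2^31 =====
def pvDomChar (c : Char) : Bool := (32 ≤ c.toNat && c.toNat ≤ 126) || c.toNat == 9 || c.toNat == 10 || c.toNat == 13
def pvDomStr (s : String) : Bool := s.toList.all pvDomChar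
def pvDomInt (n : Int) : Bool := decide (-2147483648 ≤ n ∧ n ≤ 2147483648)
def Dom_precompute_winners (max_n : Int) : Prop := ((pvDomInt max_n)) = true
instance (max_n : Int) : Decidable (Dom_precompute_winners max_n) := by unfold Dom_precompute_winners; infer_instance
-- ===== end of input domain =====

-- B keeps one running prime count in a single pass over the sieve array instead of A's per-n rescan of the prime list.

-- ===== PORT A =====
-- 'int(limit ** 0.5)': for 0 ≤ limit ≤ 2^31 the double-precision computation returns
-- exactly ⌊√limit⌋ after int(); ported as Nat.sqrt (exact on the stated domain).
def sieve_of_eratosthenes (limit : Int) : List Int :=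
  if limit < 2 then []
  else
    let is_prime := List.replicate (limit + 1).toNat true
    let is_prime := PySem.List.pySetD is_prime 0 false
    let is_prime := PySem.List.pySetD is_prime 1 false
    let is_prime := (PySem.List.pyRange 2 ((Nat.sqrt limit.toNat : Int) + 1) 1).foldl
      (fun ip i =>
        if PySem.List.pyGetD ip i false then
          (PySem.List.pyRange (i * i) (limit + 1) i).foldl
            (fun ip j => PySem.List.pySetD ip j false) ip
        else ip) is_prime
    (PySem.List.pyRange 2 (limit + 1) 1).filter (fun i => PySem.List.pyGetD is_prime i false)

def precompute_winners (max_n : Int) : List String :=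
  if max_n < 1 then ["Ben"]
  else
    let primes := sieve_of_eratosthenes max_n
    let _prime_set := PySem.Set.ofList primes   -- A builds prime_set and never uses it
    let winners := List.replicate (max_n + 1).toNat "Ben"
    (PySem.List.pyRange 1 (max_n + 1) 1).foldl
      (fun winners n =>
        let prime_count : Int :=
          primes.foldl (fun acc p => if p ≤ n then acc + 1 else acc) 0
        if prime_count % 2 == 1 then PySem.List.pySetD winners n "Maria"
        else PySem.List.pySetD winners n "Ben") winners

-- ===== PORT B =====
-- 'while i * i <= max_n: …; i += 1' — the '2 ≤ i' conjunct is a totality guard only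
-- (B always starts at i = 2 and counts up, so it is invariantly true).
def sieveLoop (max_n i : Int) (ip : List Bool) : List Bool :=
  if h : 2 ≤ i ∧ i * i ≤ max_n then
    sieveLoop max_n (i + 1)
      (if PySem.List.pyGetD ip i false then
        (PySem.List.pyRange (i * i) (max_n + 1) i).foldl
          (fun ip j => PySem.List.pySetD ip j false) ip
      else ip)
  else ip
termination_by (max_n + 1 - i).toNat
decreasing_by
  have : i * 1 ≤ i * i := by
    apply mul_le_mul_of_nonneg_left (by omega) (by omega)
  have : i ≤ max_n := by have := h.2; omega
  omega

def precompute_winners_alt (max_n : Int) : List String :=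
  if max_n < 1 then ["Ben"]
  else
    let is_prime := List.replicate (max_n + 1).toNat true
    let is_prime := PySem.List.pySetD is_prime 0 false
    let is_prime := PySem.List.pySetD is_prime 1 false
    let is_prime := sieveLoop max_n 2 is_prime
    let res := (PySem.List.pyRange 1 (max_n + 1) 1).foldl
      (fun (st : List String × Int) n =>
        let count := if PySem.List.pyGetD is_prime n false then st.2 + 1 else st.2
        (st.1 ++ [if count % 2 == 1 then "Maria" else "Ben"], count))
      (["Ben"], (0 : Int))
    res.1

-- ===== PRECONDITION & SPEC =====
def Spec_precompute_winners (max_n : Int) (out : List String) : Prop := out = precompute_winners_alt max_n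
instance (max_n : Int) (out : List String) : Decidable (Spec_precompute_winners max_n out) := by unfold Spec_precompute_winners; infer_instance

-- ===== CLAIM (what is proved, stated in full; the proofs are below) =====
def Claim_equal_precompute_winners : Prop := ∀ (max_n : Int), Dom_precompute_winners max_n → Spec_precompute_winners max_n (precompute_winners max_n)

-- ===== LEMMAS AND PROOFS =====

lemma take_set_succ (ws : List String) (k : Nat) (v : String) (h : k < ws.length) :
    (ws.set k v).take (k+1) = ws.take k ++ [v] := by
  rw [List.take_add_one, List.take_set, List.getElem?_set]
  simp [h, Nat.min_eq_left h.le, List.set_eq_of_length_le]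

-- 'i*i ≤ m' is the same loop bound as 'i < isqrt(m) + 1'
lemma sq_le_iff (m i : Int) (hm : 0 ≤ m) (h2 : 2 ≤ i) :
    i * i ≤ m ↔ i < (Nat.sqrt m.toNat : Int) + 1 := by
  have hi : i = (i.toNat : Int) := by omega
  have hmm : m = (m.toNat : Int) := by omega
  constructor
  · intro h
    have hnat : i.toNat * i.toNat ≤ m.toNat := by
      have : (i.toNat : Int) * i.toNat ≤ (m.toNat : Int) := by rw [← hi, ← hmm]; exact h
      exact_mod_cast this
    have := Nat.le_sqrt.mpr hnat
    omega
  · intro h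
    have hle : i.toNat ≤ Nat.sqrt m.toNat := by omega
    have hnat := Nat.le_sqrt.mp hle
    have : (i.toNat : Int) * i.toNat ≤ (m.toNat : Int) := by exact_mod_cast hnat
    rw [← hi, ← hmm] at this; exact this

-- B's while loop is A's for loop over range(2, isqrt(m) + 1)
lemma sieveLoop_eq (m : Int) (hm : 0 ≤ m) (i : Int) (h2 : 2 ≤ i) (ip : List Bool) :
    sieveLoop m i ip = (PySem.List.pyRange i ((Nat.sqrt m.toNat : Int) + 1) 1).foldl
      (fun ip k =>
        if PySem.List.pyGetD ip k false then
          (PySem.List.pyRange (k * k) (m + 1) k).foldl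
            (fun ip j => PySem.List.pySetD ip j false) ip
        else ip) ip := by
  induction i, ip using sieveLoop.induct m with
  | case1 i ip h IH =>
    rw [sieveLoop, dif_pos h]
    rw [PySem.List.pyRange_one_cons ((sq_le_iff m i hm h.1).mp h.2), List.foldl_cons]
    simp only [dite_eq_ite] at IH
    exact IH (by omega)
  | case2 i ip h =>
    have hni : ¬ i * i ≤ m := fun hc => h ⟨h2, hc⟩
    rw [sieveLoop, dif_neg h, PySem.List.pyRange_one_eq_nil (by
      have := (sq_le_iff m i hm h2).not.mp hni; omega), List.foldl_nil]

-- A's assignment loop: set winners[n] for n in range(a, b) on a long-enough list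
lemma foldl_pySetD_range (c : Int → Bool) (b : Int) : ∀ (a : Int) (ws : List String),
    0 ≤ a → a ≤ b → b ≤ (ws.length : Int) →
    (PySem.List.pyRange a b 1).foldl
      (fun ws n => if c n then PySem.List.pySetD ws n "Maria" else PySem.List.pySetD ws n "Ben") ws
    = ws.take a.toNat ++ (PySem.List.pyRange a b 1).map (fun n => if c n then "Maria" else "Ben")
        ++ ws.drop b.toNat := by
  intro a
  induction hfuel : (b - a).toNat generalizing a with
  | zero =>
    intro ws _ hab _
    have : a = b := by omega
    subst this
    rw [PySem.List.pyRange_one_eq_nil le_rfl]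
    simp [List.take_append_drop]
  | succ k IH =>
    intro ws h0 hab hlen
    have hab' : a < b := by omega
    rw [PySem.List.pyRange_one_cons hab', List.foldl_cons, List.map_cons]
    have hset : (if c a then PySem.List.pySetD ws a "Maria" else PySem.List.pySetD ws a "Ben")
        = ws.set a.toNat (if c a then "Maria" else "Ben") := by
      by_cases h : c a <;> simp [h, PySem.List.pySetD_of_nonneg ws _ h0]
    rw [hset]
    have hlen' : a.toNat < ws.length := by omega
    rw [IH (a+1) (by omega) _ (by omega) (by omega) (by simp only [List.length_set]; omega)]
    have h1 : (ws.set a.toNat (if c a then "Maria" else "Ben")).take (a+1).toNat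
        = ws.take a.toNat ++ [if c a then "Maria" else "Ben"] := by
      have : (a+1).toNat = a.toNat + 1 := by omega
      rw [this, take_set_succ ws _ _ hlen']
    have h2 : (ws.set a.toNat (if c a then "Maria" else "Ben")).drop b.toNat
        = ws.drop b.toNat := by
      rw [List.drop_set]; simp [show a.toNat < b.toNat by omega]
    rw [h1, h2]
    simp

-- B's appending loop with its running count
lemma foldl_append_count (pred : Int → Bool) (W : Int → String) (b : Int) :
    ∀ (a : Int) (ws : List String) (c : Int), a ≤ b →
    (PySem.List.pyRange a b 1).foldl
      (fun (st : List String × Int) n =>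
        (st.1 ++ [W (if pred n then st.2 + 1 else st.2)], if pred n then st.2 + 1 else st.2))
      (ws, c)
    = (ws ++ (PySem.List.pyRange a b 1).map
        (fun n => W (c + ((PySem.List.pyRange a (n + 1) 1).countP pred : Int))),
       c + ((PySem.List.pyRange a b 1).countP pred : Int)) := by
  intro a
  induction hfuel : (b - a).toNat generalizing a with
  | zero =>
    intro ws c hab
    have : a = b := by omega
    subst this
    rw [PySem.List.pyRange_one_eq_nil le_rfl]
    simp
  | succ k IH =>
    intro ws c hab
    have hab' : a < b := by omega
    rw [PySem.List.pyRange_one_cons hab', List.foldl_cons, List.map_cons]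
    have hc' : (if pred a then c + 1 else c)
        = c + (([a].countP pred : Nat) : Int) := by
      by_cases h : pred a <;> simp [h]
    have hsingle : PySem.List.pyRange a (a+1) 1 = [a] := PySem.List.pyRange_one_singleton a
    have hsplit : ∀ t : Int, a + 1 ≤ t →
        PySem.List.pyRange a t 1 = [a] ++ PySem.List.pyRange (a+1) t 1 := by
      intro t ht
      rw [PySem.List.pyRange_one_append a (a+1) t (by omega) ht, hsingle]
    rw [IH (a+1) (by omega) _ _ (by omega), Prod.mk.injEq]
    refine ⟨?_, ?_⟩
    · rw [List.append_assoc, List.singleton_append]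
      congr 1
      congr 1
      · congr 1
        rw [hsingle]
        exact hc'
      · apply List.map_congr_left
        intro n hn
        have hmem : a + 1 ≤ n ∧ n < b := PySem.List.mem_pyRange_one.mp (by simpa using hn)
        congr 1
        rw [hsplit (n+1) (by omega), List.countP_append, hc']
        push_cast
        ring
    · show (if pred a = true then c + 1 else c) + _ = _
      simp only [List.countP_cons]
      by_cases h : pred a
      · simp [h]; ring
      · simp [h]

-- setting an index ≠ 1 leaves the value read at index 1 unchanged
lemma pyGetD_one_set (xs : List Bool) (k : Nat) (hk : k ≠ 1) :
    PySem.List.pyGetD (xs.set k false) 1 false = PySem.List.pyGetD xs 1 false := by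
  simp only [PySem.List.pyGetD, PySem.List.pyGet?, PySem.List.pyIdx?, List.length_set]
  by_cases h : (1:Int) < xs.length <;> simp [h, List.getElem?_set, hk]

lemma pyGetD_one_foldl_set (l : List Int) : ∀ (ip : List Bool), (∀ j ∈ l, 2 ≤ j) →
    PySem.List.pyGetD (l.foldl (fun ip j => PySem.List.pySetD ip j false) ip) 1 false
    = PySem.List.pyGetD ip 1 false := by
  induction l with
  | nil => intro ip _; rfl
  | cons j l IH =>
    intro ip hl
    have hj : 2 ≤ j := hl j (by simp)
    rw [List.foldl_cons, IH _ (fun x hx => hl x (by simp [hx]))]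
    rw [PySem.List.pySetD_of_nonneg ip _ (by omega)]
    exact pyGetD_one_set ip j.toNat (by omega)

-- the sieve never marks index 1, so it stays False
lemma pyGetD_one_sieve_fold (m : Int) (r : List Int) : ∀ (ip : List Bool),
    PySem.List.pyGetD ip 1 false = false → (∀ k ∈ r, 2 ≤ k) →
    PySem.List.pyGetD (r.foldl
      (fun ip k =>
        if PySem.List.pyGetD ip k false then
          (PySem.List.pyRange (k * k) (m + 1) k).foldl
            (fun ip j => PySem.List.pySetD ip j false) ip
        else ip) ip) 1 false = false := by
  induction r with
  | nil => intro ip h1 _; exact h1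
  | cons k r IH =>
    intro ip h1 hr
    have hk : 2 ≤ k := hr k (by simp)
    rw [List.foldl_cons]
    apply IH _ _ (fun x hx => hr x (by simp [hx]))
    by_cases hc : PySem.List.pyGetD ip k false
    · rw [if_pos hc, pyGetD_one_foldl_set _ ip ?_]
      · exact h1
      · intro j hj
        have := (PySem.List.mem_pyRange_iff_of_pos (by omega) j).mp hj
        nlinarith [this.1]
    · rw [if_neg hc]; exact h1

-- A's scan of the prime list up to n equals B's prefix count of sieve Trues
lemma count_bridge (m n : Int) (ip : List Bool) (h1 : PySem.List.pyGetD ip 1 false = false)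
    (hn1 : 1 ≤ n) (hnm : n ≤ m) :
    ((PySem.List.pyRange 2 (m + 1) 1).filter (fun i => PySem.List.pyGetD ip i false)).countP
      (fun p => decide (p ≤ n))
    = (PySem.List.pyRange 1 (n + 1) 1).countP (fun k => PySem.List.pyGetD ip k false) := by
  rw [List.countP_filter]
  rw [PySem.List.pyRange_one_append 2 (n+1) (m+1) (by omega) (by omega), List.countP_append]
  have h2 : (PySem.List.pyRange (n+1) (m+1) 1).countP
      (fun k => decide (k ≤ n) && PySem.List.pyGetD ip k false) = 0 := by
    rw [List.countP_eq_zero]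
    intro k hk
    have := PySem.List.mem_pyRange_one.mp hk
    simp [show ¬ k ≤ n by omega]
  rw [h2, Nat.add_zero]
  have h3 : (PySem.List.pyRange 2 (n+1) 1).countP
      (fun k => decide (k ≤ n) && PySem.List.pyGetD ip k false)
      = (PySem.List.pyRange 2 (n+1) 1).countP (fun k => PySem.List.pyGetD ip k false) := by
    apply List.countP_congr
    intro k hk
    have := PySem.List.mem_pyRange_one.mp hk
    simp [show k ≤ n by omega]
  rw [h3]
  rw [PySem.List.pyRange_one_cons (show (1:Int) < n+1 by omega), List.countP_cons]
  norm_num [h1]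

-- the main case: max_n ≥ 2
lemma main_eq (m : Int) (hm : 2 ≤ m) : precompute_winners m = precompute_winners_alt m := by
  rw [precompute_winners, precompute_winners_alt, if_neg (by omega), if_neg (by omega)]
  rw [sieve_of_eratosthenes, if_neg (by omega)]
  simp only []
  rw [sieveLoop_eq m (by omega) 2 (by omega)]
  set ip1 := PySem.List.pySetD (PySem.List.pySetD (List.replicate (m + 1).toNat true) 0 false) 1 false with hip1
  have hip1f : PySem.List.pyGetD ip1 1 false = false := by
    rw [hip1, PySem.List.pySetD_of_nonneg _ _ (by norm_num), PySem.List.pySetD_of_nonneg _ _ (by norm_num)]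
    simp only [PySem.List.pyGetD, PySem.List.pyGet?, PySem.List.pyIdx?, List.length_set,
      List.getElem?_set, List.length_replicate]
    simp [show (0:Int) < m by omega, show (0:Int) ≤ m by omega]
  set ipA := (PySem.List.pyRange 2 ((m.toNat.sqrt : Int) + 1) 1).foldl
      (fun ip i =>
        if PySem.List.pyGetD ip i false = true then
          List.foldl (fun ip j => PySem.List.pySetD ip j false) ip
            (PySem.List.pyRange (i * i) (m + 1) i)
        else ip) ip1 with hipA
  have h1 : PySem.List.pyGetD ipA 1 false = false := by
    rw [hipA]
    exact pyGetD_one_sieve_fold m _ ip1 hip1f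
      (fun k hk => (PySem.List.mem_pyRange_one.mp hk).1)
  rw [foldl_pySetD_range
      (fun n => ((List.filter (fun i => PySem.List.pyGetD ipA i false)
        (PySem.List.pyRange 2 (m + 1) 1)).foldl (fun acc p => if p ≤ n then acc + 1 else acc) 0) % 2 == 1)
      (m+1) 1 _ (by norm_num) (by omega) (by simp only [List.length_replicate]; omega)]
  rw [foldl_append_count (fun n => PySem.List.pyGetD ipA n false)
      (fun c => if c % 2 == 1 then "Maria" else "Ben") (m+1) 1 ["Ben"] 0 (by omega)]
  simp only []
  have hmin : min 1 (m+1).toNat = 1 := by omega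
  simp only [show Int.toNat 1 = 1 from rfl, List.take_replicate, List.drop_replicate,
    hmin, Nat.sub_self, List.replicate_one, List.replicate_zero, List.append_nil]
  congr 1
  apply List.map_congr_left
  intro n hn
  have hmem : 1 ≤ n ∧ n < m + 1 := PySem.List.mem_pyRange_one.mp hn
  rw [PySem.List.foldl_ite_add_one (fun p => p ≤ n) _ 0]
  rw [count_bridge m n ipA h1 (by omega) (by omega)]

-- ===== VERDICT (by name: the statement is the Claim_ definition above) =====
theorem precompute_winners_spec : Claim_equal_precompute_winners := by
  intro m _
  unfold Spec_precompute_winners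
  by_cases hlt : m < 1
  · rw [precompute_winners, precompute_winners_alt, if_pos hlt, if_pos hlt]
  · by_cases h1 : m = 1
    · subst h1
      rw [precompute_winners, precompute_winners_alt, if_neg (by norm_num), if_neg (by norm_num)]
      simp only []
      rw [sieveLoop.eq_def]
      norm_num
      decide
    · exact main_eq m (by omega)
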